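-- pv_equiv track=rewrite | github.com/Kkumar-007/Artistic_Intent_Agentic_Framework | Prof_Helena/vision_tools.py | _assess_color_intensity
-- ===== SOURCE A (Python) =====
-- from typing import Dict, List, Any, Optional, Tuple
--
-- def _assess_color_intensity(colors: List[str]) -> str:
--     """Assess color intensity/saturation level"""
--     # This is a simplified assessment based on color names
--     high_intensity = ['red', 'blue', 'yellow', 'orange', 'purple', 'green']
--     low_intensity = ['brown', 'gray', 'grey', 'beige', 'cream']
--
--     high_count = sum(1 for color in colors if color in high_intensity)
--     low_count = sum(1 for color in colors if color in low_intensity)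
--
--     if high_count > low_count:
--         return 'vibrant'
--     elif low_count > high_count:
--         return 'muted'
--     else:
--         return 'mixed'
-- ===== SOURCE B (Python) =====
-- _WEIGHTS = [('red', 1), ('blue', 1), ('yellow', 1), ('orange', 1),
--             ('purple', 1), ('green', 1),
--             ('brown', -1), ('gray', -1), ('grey', -1), ('beige', -1), ('cream', -1)]
--
-- def _assess_color_intensity(colors):
--     """Assess color intensity by weighting each known color name's occurrence count."""
--     score = 0
--     for name, weight in _WEIGHTS:
--         score += weight * colors.count(name)
--     if score > 0:
--         return 'vibrant'
--     if score < 0: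
--         return 'muted'
--     return 'mixed'
-- ===== Notes on version B (the rewrite author's own statement) =====
-- stated objective: alternative
-- what changed: Inverts the traversal: instead of scanning colors twice and comparing two counts, B iterates over the fixed weighted vocabulary and accumulates weight * colors.count(name) into one signed score compared with 0.
import Mathlib
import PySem

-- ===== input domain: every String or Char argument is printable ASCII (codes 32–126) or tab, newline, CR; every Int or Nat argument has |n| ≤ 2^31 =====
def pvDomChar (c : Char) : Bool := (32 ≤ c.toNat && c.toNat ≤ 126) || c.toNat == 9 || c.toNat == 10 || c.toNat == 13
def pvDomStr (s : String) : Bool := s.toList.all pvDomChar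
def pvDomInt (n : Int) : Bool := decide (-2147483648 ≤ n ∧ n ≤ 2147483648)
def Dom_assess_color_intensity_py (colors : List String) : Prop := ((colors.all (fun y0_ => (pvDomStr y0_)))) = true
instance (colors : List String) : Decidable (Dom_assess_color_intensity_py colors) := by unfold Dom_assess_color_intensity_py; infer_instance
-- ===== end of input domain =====

-- B inverts the traversal: it loops over a fixed weighted vocabulary accumulating
-- weight * colors.count(name) into one signed score, instead of A's two scans over colors.
-- ===== PORT A =====
def pvHighIntensity : List String := ["red", "blue", "yellow", "orange", "purple", "green"]
def pvLowIntensity : List String := ["brown", "gray", "grey", "beige", "cream"]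

def assess_color_intensity_py (colors : List String) : String :=
  let high_count : Int := colors.foldl (fun acc color => if color ∈ pvHighIntensity then acc + 1 else acc) 0
  let low_count : Int := colors.foldl (fun acc color => if color ∈ pvLowIntensity then acc + 1 else acc) 0
  if high_count > low_count then "vibrant"
  else if low_count > high_count then "muted"
  else "mixed"

-- ===== PORT B =====
def pvWeights : List (String × Int) :=
  [("red", 1), ("blue", 1), ("yellow", 1), ("orange", 1), ("purple", 1), ("green", 1),
   ("brown", -1), ("gray", -1), ("grey", -1), ("beige", -1), ("cream", -1)]

def assess_color_intensity_py_alt (colors : List String) : String :=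
  let score : Int :=
    pvWeights.foldl (fun s nw => s + nw.2 * (PySem.List.count colors nw.1 : Int)) 0
  if score > 0 then "vibrant"
  else if score < 0 then "muted"
  else "mixed"

-- ===== PRECONDITION & SPEC =====
def Spec_assess_color_intensity_py (colors : List String) (out : String) : Prop := out = assess_color_intensity_py_alt colors
instance (colors : List String) (out : String) : Decidable (Spec_assess_color_intensity_py colors out) := by unfold Spec_assess_color_intensity_py; infer_instance

-- ===== CLAIM =====
def Claim_equal_assess_color_intensity_py : Prop := ∀ (colors : List String), Dom_assess_color_intensity_py colors → Spec_assess_color_intensity_py colors (assess_color_intensity_py colors)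

-- ===== LEMMAS AND PROOFS =====

-- A's counting folds are countP of membership
lemma pv_fold_high (colors : List String) :
    colors.foldl (fun acc color => if color ∈ pvHighIntensity then acc + 1 else acc) (0 : Int)
      = (colors.countP (· ∈ pvHighIntensity) : Int) := by
  simpa using PySem.List.foldl_ite_add_one (p := (· ∈ pvHighIntensity)) (l := colors) (a := 0)

lemma pv_fold_low (colors : List String) :
    colors.foldl (fun acc color => if color ∈ pvLowIntensity then acc + 1 else acc) (0 : Int)
      = (colors.countP (· ∈ pvLowIntensity) : Int) := by
  simpa using PySem.List.foldl_ite_add_one (p := (· ∈ pvLowIntensity)) (l := colors) (a := 0)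

-- countP of membership in a cons vocabulary splits into count of the head plus the tail countP
lemma pv_countP_cons (n : String) (ns : List String) (hn : n ∉ ns) (colors : List String) :
    colors.countP (fun c => decide (c ∈ n :: ns))
      = colors.count n + colors.countP (fun c => decide (c ∈ ns)) := by
  induction colors with
  | nil => simp
  | cons c cs ih =>
    simp only [List.countP_cons, List.count_cons, ih]
    by_cases h : c = n
    · subst h
      have : c ∉ ns := hn
      simp [this]
      omega
    · simp [List.mem_cons, h]
      split_ifs <;> omega

-- countP of membership = sum of per-name counts, for a duplicate-free vocabulary
lemma pv_countP_sum (names : List String) (hn : names.Nodup) (colors : List String) :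
    (colors.countP (fun c => decide (c ∈ names)) : Int)
      = (names.map (fun n => (colors.count n : Int))).sum := by
  induction names with
  | nil => simp
  | cons n ns ih =>
    rw [pv_countP_cons n ns (by simpa using (List.nodup_cons.mp hn).1)]
    push_cast
    rw [ih (List.nodup_cons.mp hn).2]
    simp

-- B's score is the difference of the two membership counts
lemma pv_score_eq (colors : List String) :
    pvWeights.foldl (fun s nw => s + nw.2 * (PySem.List.count colors nw.1 : Int)) 0
      = (colors.countP (fun c => decide (c ∈ pvHighIntensity)) : Int)
        - (colors.countP (fun c => decide (c ∈ pvLowIntensity)) : Int) := by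
  have hh := pv_countP_sum pvHighIntensity (by decide) colors
  have hl := pv_countP_sum pvLowIntensity (by decide) colors
  simp only [pvHighIntensity, List.map_cons, List.map_nil, List.sum_cons, List.sum_nil] at hh
  simp only [pvLowIntensity, List.map_cons, List.map_nil, List.sum_cons, List.sum_nil] at hl
  simp only [pvWeights, pvHighIntensity, pvLowIntensity, List.foldl_cons, List.foldl_nil,
    PySem.List.count]
  rw [hh, hl]
  ring

-- ===== VERDICT =====
theorem assess_color_intensity_py_spec : Claim_equal_assess_color_intensity_py := by
  intro colors _
  unfold Spec_assess_color_intensity_py assess_color_intensity_py assess_color_intensity_py_alt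
  rw [pv_fold_high, pv_fold_low, pv_score_eq]
  dsimp only
  split_ifs <;> first | rfl | omega
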